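-- pv_equiv track=rewrite | github.com/beeteetoo/5413_Class_Test | toolkit/task2_network_cartographer/gateway_scanner.py | parse_port_input
-- ===== SOURCE A (Python) =====
-- def parse_port_input(port_str: str) -> list[int]:
--     """
--     Convert a port specification string into a sorted, deduplicated list.
--
--     '80'          → [80]
--     '1-1024'      → [1, 2, 3, ... , 1023, 1024]  (yes, all of them)
--     '21,22,80'    → [21, 22, 80]
--     '1-3,8,10-12' → [1, 2, 3, 8, 10, 11, 12]
--     """
--     ports = []
--
--     # Split on commas first. '21,22,80' becomes ['21', '22', '80'].
--     # Each piece is either a single port or a range. We handle both below.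
--     for part in port_str.split(","):
--         part = part.strip()  # defensive against '21, 22, 80' with spaces
--
--         if "-" in part:
--             # It is a range: '1-1024'
--             # split('-', 1) limits to ONE split — the 1 is not optional.
--             # '1-1024'.split('-', 1) → ['1', '1024']  ✓
--             # Without the 1: still fine here, but worth being explicit.
--             pieces = part.split("-", 1)
--             start, end = [int(x.strip()) for x in pieces]
--             # ^ That is a list comprehension. [expression for item in iterable]
--             # Equivalent to start = int(pieces[0].strip()); end = int(pieces[1].strip())
--             # Two lines compressed to one. Both are correct.
--
--             # range(start, end + 1) — the + 1 is because range() excludes the end.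
--             # range(1, 1025) gives 1 to 1024. Not range(1, 1024). Easy to forget.
--             ports.extend(range(start, end + 1))
--
--             # HINT: What should happen if start is 0? Or end is 70000?
--             # Or someone types '80-20' (start bigger than end)?
--             # Right now: nothing good, go on try it.
--             # Something useful would involve ValueError.
--
--         else:
--             # It is a single port: '80'
--             ports.append(int(part))
--
--             # HINT: What should happen if part is 'abc'?
--             # int('abc') does not quietly return 0.
--             # That exception currently propagates upward uncaught.
--             # Whether that is acceptable is a question worth asking.
--
--     # sorted() guarantees ascending order — the JSON contract requires it.
--     # set() removes duplicates — '1-5,3,4' should produce [1,2,3,4,5].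
--     # Both operations happen in one line. Python is occasionally kind to your eyes.
--     return sorted(set(ports))
-- ===== SOURCE B (Python) =====
-- def parse_port_input(port_str: str) -> list[int]:
--     # Parse each part into an (start, end) interval, drop empty (reversed) ones,
--     # sort by start, merge overlapping/adjacent intervals, then expand once.
--     intervals = []
--     for part in port_str.split(","):
--         part = part.strip()
--         if "-" in part:
--             a, b = part.split("-", 1)
--             s, e = int(a.strip()), int(b.strip())
--         else:
--             s = e = int(part)
--         if s <= e:
--             intervals.append((s, e))
--     intervals.sort(key=lambda iv: iv[0])
--     merged = []
--     cur = None
--     for s, e in intervals: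
--         if cur is not None and s <= cur[1] + 1:
--             if e > cur[1]:
--                 cur = (cur[0], e)
--         else:
--             if cur is not None:
--                 merged.append(cur)
--             cur = (s, e)
--     if cur is not None:
--         merged.append(cur)
--     return [p for s, e in merged for p in range(s, e + 1)]
-- ===== Notes on version B (the rewrite author's own statement) =====
-- stated objective: alternative
-- what changed: B parses each comma part into a (start,end) interval instead of expanding it, sorts the intervals by start, merges overlapping/adjacent intervals in one sweep, and expands the merged intervals once, so the sorted deduplicated result is produced directly without materialising duplicates or calling sorted(set(...)).
import Mathlib
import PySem

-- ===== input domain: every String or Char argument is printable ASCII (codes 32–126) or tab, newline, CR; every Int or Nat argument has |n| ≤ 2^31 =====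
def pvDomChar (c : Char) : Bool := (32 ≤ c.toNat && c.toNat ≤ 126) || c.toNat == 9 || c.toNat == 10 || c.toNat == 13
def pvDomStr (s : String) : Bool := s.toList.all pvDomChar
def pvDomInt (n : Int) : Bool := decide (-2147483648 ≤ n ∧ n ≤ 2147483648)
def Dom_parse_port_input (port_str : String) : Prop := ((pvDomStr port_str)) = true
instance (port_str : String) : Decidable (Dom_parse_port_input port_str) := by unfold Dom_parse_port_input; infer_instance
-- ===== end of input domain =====

-- B replaces A's "expand every part, then sorted(set(...))" by parsing each part to an
-- (start, end) interval, sorting the intervals by start, merging overlapping/adjacent ones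
-- in one sweep and expanding the merged intervals once, already sorted and duplicate-free.

-- ===== PORT A =====
-- expansion of one comma-separated part ('80' or '1-1024'); none = the int() ValueError
def pvExpandA (part : String) : Option (List Int) :=
  let p := PySem.Str.strip part
  if PySem.Str.isIn "-" p then
    match PySem.Str.splitMax? p "-" 1 with
    | some pieces =>
      match pieces.map (fun x => PySem.Int.ofStr? (PySem.Str.strip x)) with
      | [some s, some e] => some (PySem.List.pyRange s (e + 1))
      | _ => none
    | none => none
  else
    (PySem.Int.ofStr? p).map (fun n => [n])

def parse_port_input (port_str : String) : List Int :=
  let ports := ((PySem.Str.split? port_str ",").getD []).foldl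
    (fun acc part => acc ++ (pvExpandA part).getD []) []
  PySem.List.sorted (PySem.Set.ofList ports) (fun x => x)

-- ===== PORT B =====
-- one part as an (start, end) interval; none = the int() ValueError
def pvIntervalB (part : String) : Option (Int × Int) :=
  let p := PySem.Str.strip part
  if PySem.Str.isIn "-" p then
    match PySem.Str.splitMax? p "-" 1 with
    | some [a, b] =>
      match PySem.Int.ofStr? (PySem.Str.strip a), PySem.Int.ofStr? (PySem.Str.strip b) with
      | some s, some e => some (s, e)
      | _, _ => none
    | _ => none
  else
    (PySem.Int.ofStr? p).map (fun n => (n, n))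

-- the intervals loop of B: collect the non-empty intervals (none = some part raised)
def pvIntervalsB (parts : List String) : Option (List (Int × Int)) :=
  parts.foldl
    (fun acc part =>
      match acc, pvIntervalB part with
      | some l, some iv => some (if iv.1 ≤ iv.2 then l ++ [iv] else l)
      | _, _ => none)
    (some [])

-- one step of B's merge sweep; state = (merged so far, current open interval)
def pvMergeStep (st : List (Int × Int) × Option (Int × Int)) (iv : Int × Int) :
    List (Int × Int) × Option (Int × Int) :=
  match st.2 with
  | some c =>
    if iv.1 ≤ c.2 + 1 then
      (st.1, some (if c.2 < iv.2 then (c.1, iv.2) else c))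
    else (st.1 ++ [c], some iv)
  | none => (st.1, some iv)

-- flush the open interval after the sweep
def pvFinish (st : List (Int × Int) × Option (Int × Int)) : List (Int × Int) :=
  match st.2 with
  | some c => st.1 ++ [c]
  | none => st.1

def parse_port_input_alt (port_str : String) : List Int :=
  match pvIntervalsB ((PySem.Str.split? port_str ",").getD []) with
  | none => []
  | some ivs =>
    let sortedIvs := PySem.List.sorted ivs (fun iv => iv.1)
    let merged := pvFinish (sortedIvs.foldl pvMergeStep ([], none))
    merged.foldl (fun acc iv => acc ++ PySem.List.pyRange iv.1 (iv.2 + 1)) []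

-- ===== PRECONDITION & SPEC =====
-- whether one comma-separated part parses (a single port, or an 'a-b' range)
def pvPartOk (part : String) : Bool :=
  let p := PySem.Str.strip part
  if PySem.Str.isIn "-" p then
    match PySem.Str.splitMax? p "-" 1 with
    | some [a, b] =>
      (PySem.Int.ofStr? (PySem.Str.strip a)).isSome &&
        (PySem.Int.ofStr? (PySem.Str.strip b)).isSome
    | _ => false
  else
    (PySem.Int.ofStr? p).isSome

-- Pre_ excludes exactly the inputs where A raises: some comma part whose int() is a ValueError
def Pre_parse_port_input (port_str : String) : Prop :=
  ∀ part ∈ (PySem.Str.split? port_str ",").getD [], pvPartOk part = true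
instance (port_str : String) : Decidable (Pre_parse_port_input port_str) := by
  unfold Pre_parse_port_input; infer_instance

def pvWitness_parse_port_input : String := "1-3, 8 ,10-12,80-20,8"

def Spec_parse_port_input (port_str : String) (out : List Int) : Prop := out = parse_port_input_alt port_str
instance (port_str : String) (out : List Int) : Decidable (Spec_parse_port_input port_str out) := by unfold Spec_parse_port_input; infer_instance

-- ===== CLAIM (what is proved, stated in full; the proofs are below) =====
def Claim_equal_parse_port_input : Prop := ∀ (port_str : String), Dom_parse_port_input port_str → Pre_parse_port_input port_str → Spec_parse_port_input port_str (parse_port_input port_str)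

-- ===== LEMMAS AND PROOFS =====

-- the intervals actually kept by B's first loop, written as one flatMap
def pvCollect (parts : List String) : List (Int × Int) :=
  parts.flatMap (fun part =>
    match pvIntervalB part with
    | some iv => if iv.1 ≤ iv.2 then [iv] else []
    | none => [])

theorem expandA_eq (part : String) :
    pvExpandA part = (pvIntervalB part).map (fun iv => PySem.List.pyRange iv.1 (iv.2 + 1)) := by
  unfold pvExpandA pvIntervalB
  simp only []
  by_cases hin : PySem.Str.isIn "-" (PySem.Str.strip part) = true
  case pos =>
    simp only [hin, if_true]
    rcases h : PySem.Str.splitMax? (PySem.Str.strip part) "-" 1 with _ | l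
    · simp
    · match l with
      | [] => simp
      | [a] => simp
      | [a, b] =>
        simp only [List.map]
        rcases PySem.Int.ofStr? (PySem.Str.strip a) with _ | s <;>
          rcases PySem.Int.ofStr? (PySem.Str.strip b) with _ | e <;> simp
      | a :: b :: c :: t => simp
  case neg =>
    simp only [hin]
    rcases PySem.Int.ofStr? (PySem.Str.strip part) with _ | n <;> simp

theorem partOk_isSome (part : String) :
    pvPartOk part = (pvIntervalB part).isSome := by
  unfold pvPartOk pvIntervalB
  simp only []
  by_cases hin : PySem.Str.isIn "-" (PySem.Str.strip part) = true
  case pos =>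
    simp only [hin, if_true]
    rcases h : PySem.Str.splitMax? (PySem.Str.strip part) "-" 1 with _ | l
    · simp
    · match l with
      | [] => simp
      | [a] => simp
      | [a, b] =>
        rcases hs : PySem.Int.ofStr? (PySem.Str.strip a) with _ | s <;>
          rcases he : PySem.Int.ofStr? (PySem.Str.strip b) with _ | e <;> simp [hs, he]
      | a :: b :: c :: t => simp
  case neg =>
    simp only [hin]
    rcases PySem.Int.ofStr? (PySem.Str.strip part) with _ | n <;> simp

theorem foldl_intervals (parts : List String) (l0 : List (Int × Int))
    (h : ∀ part ∈ parts, pvPartOk part = true) :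
    parts.foldl
      (fun acc part =>
        match acc, pvIntervalB part with
        | some l, some iv => some (if iv.1 ≤ iv.2 then l ++ [iv] else l)
        | _, _ => none)
      (some l0) = some (l0 ++ pvCollect parts) := by
  induction parts generalizing l0 with
  | nil => simp [pvCollect]
  | cons p t ih =>
    have hp := h p (by simp)
    rw [partOk_isSome] at hp
    rcases hiv : pvIntervalB p with _ | iv
    · rw [hiv] at hp; simp at hp
    · have ih' := ih (if iv.1 ≤ iv.2 then l0 ++ [iv] else l0)
        (fun q hq => h q (List.mem_cons_of_mem _ hq))
      simp only [List.foldl_cons, hiv]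
      rw [ih']
      by_cases hle : iv.1 ≤ iv.2 <;> simp [pvCollect, hiv, hle]

theorem mem_collect (parts : List String) (iv : Int × Int) :
    iv ∈ pvCollect parts ↔ ∃ part ∈ parts, pvIntervalB part = some iv ∧ iv.1 ≤ iv.2 := by
  simp only [pvCollect, List.mem_flatMap]
  constructor
  · rintro ⟨part, hp, hm⟩
    rcases hiv : pvIntervalB part with _ | jv <;> rw [hiv] at hm
    · simp at hm
    · by_cases hle : jv.1 ≤ jv.2 <;> simp [hle] at hm
      exact ⟨part, hp, by simp [hiv, hm]; omega⟩
  · rintro ⟨part, hp, hiv, hle⟩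
    exact ⟨part, hp, by simp [hiv, hle]⟩

theorem merge_inv (ivs : List (Int × Int)) (acc : List (Int × Int)) (c : Int × Int)
    (hle : ∀ iv ∈ ivs, iv.1 ≤ iv.2)
    (hsorted : ivs.Pairwise (fun a b => a.1 ≤ b.1))
    (hgood1 : ∀ iv ∈ acc ++ [c], iv.1 ≤ iv.2)
    (hgood2 : (acc ++ [c]).Pairwise (fun a b => a.2 + 1 < b.1))
    (hlink : ∀ iv ∈ ivs, c.1 ≤ iv.1) :
    (∀ iv ∈ pvFinish (ivs.foldl pvMergeStep (acc, some c)), iv.1 ≤ iv.2) ∧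
    (pvFinish (ivs.foldl pvMergeStep (acc, some c))).Pairwise (fun a b => a.2 + 1 < b.1) ∧
    (∀ x : Int, (∃ iv ∈ pvFinish (ivs.foldl pvMergeStep (acc, some c)), iv.1 ≤ x ∧ x ≤ iv.2) ↔
      (∃ iv ∈ acc ++ [c], iv.1 ≤ x ∧ x ≤ iv.2) ∨ ∃ iv ∈ ivs, iv.1 ≤ x ∧ x ≤ iv.2) := by
  induction ivs generalizing acc c with
  | nil =>
    refine ⟨?_, ?_, ?_⟩
    · simpa [pvFinish] using hgood1
    · simpa [pvFinish] using hgood2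
    · simp [pvFinish]
  | cons iv t ih =>
    have hciv : c.1 ≤ iv.1 := hlink iv (by simp)
    have hcle : c.1 ≤ c.2 := hgood1 c (by simp)
    have hivle : iv.1 ≤ iv.2 := hle iv (by simp)
    simp only [List.foldl_cons]
    by_cases hov : iv.1 ≤ c.2 + 1
    · -- merge into current
      set c' : Int × Int := if c.2 < iv.2 then (c.1, iv.2) else c with hc'
      have hstep : pvMergeStep (acc, some c) iv = (acc, some c') := by
        simp only [pvMergeStep, hov, if_true]
        exact congrArg (fun z => (acc, some z)) hc'.symm
      rw [hstep]
      have hc'1 : c'.1 = c.1 := by by_cases h2 : c.2 < iv.2 <;> simp [hc', h2]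
      have hc'2 : c'.2 = max c.2 iv.2 := by
        by_cases h2 : c.2 < iv.2 <;> simp [hc', h2] <;> omega
      have hgood1' : ∀ jv ∈ acc ++ [c'], jv.1 ≤ jv.2 := by
        intro jv hjv
        rcases List.mem_append.1 hjv with hj | hj
        · exact hgood1 jv (by simp [hj])
        · simp at hj; subst hj; omega
      have hgood2' : (acc ++ [c']).Pairwise (fun a b => a.2 + 1 < b.1) := by
        rw [List.pairwise_append] at hgood2 ⊢
        refine ⟨hgood2.1, by simp, ?_⟩
        intro a ha b hb
        simp at hb; subst hb
        rw [hc'1]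
        exact hgood2.2.2 a ha c (by simp)
      have ih' := ih acc c' (fun j hj => hle j (List.mem_cons_of_mem _ hj))
        ((List.pairwise_cons.1 hsorted).2) hgood1' hgood2'
        (fun j hj => by
          rw [hc'1]
          exact le_trans hciv ((List.pairwise_cons.1 hsorted).1 j hj))
      refine ⟨ih'.1, ih'.2.1, ?_⟩
      intro x
      rw [ih'.2.2 x]
      constructor
      · rintro (⟨jv, hjv, h1, h2⟩ | h)
        · rcases List.mem_append.1 hjv with hj | hj
          · exact Or.inl ⟨jv, by simp [hj], h1, h2⟩
          · simp at hj; subst hj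
            rw [hc'1] at h1; rw [hc'2] at h2
            by_cases hx : x ≤ c.2
            · exact Or.inl ⟨c, by simp, h1, hx⟩
            · exact Or.inr ⟨iv, by simp, by omega, by omega⟩
        · exact Or.inr (by rcases h with ⟨j, hj, hh⟩; exact ⟨j, by simp [hj], hh⟩)
      · rintro (⟨jv, hjv, h1, h2⟩ | ⟨jv, hjv, h1, h2⟩)
        · rcases List.mem_append.1 hjv with hj | hj
          · exact Or.inl ⟨jv, by simp [hj], h1, h2⟩
          · simp at hj; subst hj
            exact Or.inl ⟨c', by simp, by omega, by omega⟩
        · rcases List.mem_cons.1 hjv with hj | hj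
          · subst hj
            exact Or.inl ⟨c', by simp, by omega, by omega⟩
          · exact Or.inr ⟨jv, hj, h1, h2⟩
    · -- push current, open iv
      have hstep : pvMergeStep (acc, some c) iv = (acc ++ [c], some iv) := by
        simp [pvMergeStep, hov]
      rw [hstep]
      have hgood1' : ∀ jv ∈ (acc ++ [c]) ++ [iv], jv.1 ≤ jv.2 := by
        intro jv hjv
        rcases List.mem_append.1 hjv with hj | hj
        · exact hgood1 jv hj
        · simp at hj; subst hj; exact hivle
      have hgood2' : ((acc ++ [c]) ++ [iv]).Pairwise (fun a b => a.2 + 1 < b.1) := by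
        rw [List.pairwise_append]
        refine ⟨hgood2, by simp, ?_⟩
        intro a ha b hb
        simp at hb; subst hb
        rcases List.mem_append.1 ha with hj | hj
        · rw [List.pairwise_append] at hgood2
          have := hgood2.2.2 a hj c (by simp)
          omega
        · simp at hj; subst hj; omega
      have ih' := ih (acc ++ [c]) iv (fun j hj => hle j (List.mem_cons_of_mem _ hj))
        ((List.pairwise_cons.1 hsorted).2) hgood1' hgood2'
        ((List.pairwise_cons.1 hsorted).1)
      refine ⟨ih'.1, ih'.2.1, ?_⟩
      intro x
      rw [ih'.2.2 x]
      constructor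
      · rintro (⟨jv, hjv, hh⟩ | ⟨jv, hjv, hh⟩)
        · rcases List.mem_append.1 hjv with hj | hj
          · exact Or.inl ⟨jv, hj, hh⟩
          · simp at hj; exact Or.inr ⟨iv, by simp, hj ▸ hh⟩
        · exact Or.inr ⟨jv, by simp [hjv], hh⟩
      · rintro (⟨jv, hjv, hh⟩ | ⟨jv, hjv, hh⟩)
        · exact Or.inl ⟨jv, by simp at hjv ⊢; tauto, hh⟩
        · rcases List.mem_cons.1 hjv with hj | hj
          · subst hj; exact Or.inl ⟨jv, by simp, hh⟩
          · exact Or.inr ⟨jv, hj, hh⟩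

theorem mem_expand (l : List (Int × Int)) (x : Int) :
    x ∈ l.flatMap (fun iv => PySem.List.pyRange iv.1 (iv.2 + 1)) ↔
      ∃ iv ∈ l, iv.1 ≤ x ∧ x ≤ iv.2 := by
  simp [List.mem_flatMap, PySem.List.mem_pyRange_one]

theorem expand_pairwise (l : List (Int × Int))
    (h : l.Pairwise (fun a b => a.2 + 1 < b.1)) :
    (l.flatMap (fun iv => PySem.List.pyRange iv.1 (iv.2 + 1))).Pairwise (· < ·) := by
  induction l with
  | nil => simp
  | cons c t ih =>
    rw [List.flatMap_cons, List.pairwise_append]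
    rcases List.pairwise_cons.1 h with ⟨hc, ht⟩
    refine ⟨PySem.List.pairwise_lt_pyRange_one _ _, ih ht, ?_⟩
    intro a ha b hb
    rw [PySem.List.mem_pyRange_one] at ha
    rw [mem_expand] at hb
    rcases hb with ⟨iv, hiv, h1, h2⟩
    have := hc iv hiv
    omega

theorem main_eq (port_str : String)
    (hpre : ∀ part ∈ (PySem.Str.split? port_str ",").getD [], pvPartOk part = true) :
    parse_port_input port_str = parse_port_input_alt port_str := by
  unfold parse_port_input parse_port_input_alt
  set parts := (PySem.Str.split? port_str ",").getD [] with hparts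
  have hports : parts.foldl (fun acc part => acc ++ (pvExpandA part).getD []) []
      = parts.flatMap (fun part => (pvExpandA part).getD []) := by
    rw [PySem.List.foldl_append_eq_flatMap]; simp
  have hivs : pvIntervalsB parts = some (pvCollect parts) := by
    unfold pvIntervalsB
    rw [foldl_intervals parts [] hpre]; simp
  rw [hports, hivs]
  simp only []
  -- membership of A's expanded ports list
  have hmemports : ∀ x : Int, x ∈ parts.flatMap (fun part => (pvExpandA part).getD []) ↔
      ∃ part ∈ parts, ∃ iv, pvIntervalB part = some iv ∧ iv.1 ≤ x ∧ x ≤ iv.2 := by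
    intro x
    rw [List.mem_flatMap]
    constructor
    · rintro ⟨part, hp, hx⟩
      rw [expandA_eq] at hx
      rcases hiv : pvIntervalB part with _ | iv <;> rw [hiv] at hx
      · simp at hx
      · simp [PySem.List.mem_pyRange_one] at hx
        exact ⟨part, hp, iv, hiv, hx.1, by omega⟩
    · rintro ⟨part, hp, iv, hiv, h1, h2⟩
      refine ⟨part, hp, ?_⟩
      rw [expandA_eq, hiv]
      simp [PySem.List.mem_pyRange_one]
      omega
  -- facts about the sorted interval list
  set sIvs := PySem.List.sorted (pvCollect parts) (fun iv => iv.1) with hsIvs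
  have hsmem : ∀ iv, iv ∈ sIvs ↔ iv ∈ pvCollect parts :=
    fun iv => PySem.List.mem_sorted (pvCollect parts) (fun iv => iv.1) false iv
  have hsle : ∀ iv ∈ sIvs, iv.1 ≤ iv.2 := by
    intro iv hiv
    rcases (mem_collect parts iv).1 ((hsmem iv).1 hiv) with ⟨_, _, _, h⟩
    exact h
  have hssorted : sIvs.Pairwise (fun a b => a.1 ≤ b.1) :=
    PySem.List.sorted_pairwise (pvCollect parts) (fun iv => iv.1)
  -- the union of intervals covered, as reached by x
  have hcover : ∀ x : Int, (∃ iv ∈ sIvs, iv.1 ≤ x ∧ x ≤ iv.2) ↔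
      x ∈ parts.flatMap (fun part => (pvExpandA part).getD []) := by
    intro x
    rw [hmemports]
    constructor
    · rintro ⟨iv, hiv, h1, h2⟩
      rcases (mem_collect parts iv).1 ((hsmem iv).1 hiv) with ⟨part, hp, hsome, _⟩
      exact ⟨part, hp, iv, hsome, h1, h2⟩
    · rintro ⟨part, hp, iv, hsome, h1, h2⟩
      refine ⟨iv, (hsmem iv).2 ((mem_collect parts iv).2 ⟨part, hp, hsome, by omega⟩), h1, h2⟩
  rcases hcase : sIvs with _ | ⟨h0, tl⟩
  · -- no intervals: A's ports list is empty too
    have : parts.flatMap (fun part => (pvExpandA part).getD []) = [] := by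
      rw [List.eq_nil_iff_forall_not_mem]
      intro x hx
      rcases (hcover x).2 hx with ⟨iv, hiv, _⟩
      rw [hcase] at hiv; simp at hiv
    rw [this]
    rfl
  · -- at least one interval: run the merge sweep
    have hstep0 : List.foldl pvMergeStep ([], none) (h0 :: tl)
        = List.foldl pvMergeStep ([], some h0) tl := by
      simp [pvMergeStep]
    have hm := merge_inv tl [] h0
      (fun j hj => hsle j (by rw [hcase]; exact List.mem_cons_of_mem _ hj))
      ((List.pairwise_cons.1 (hcase ▸ hssorted)).2)
      (by intro kv hkv; simp at hkv; rw [hkv]; exact hsle h0 (by rw [hcase]; simp))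
      (by simp)
      ((List.pairwise_cons.1 (hcase ▸ hssorted)).1)
    set merged := pvFinish (List.foldl pvMergeStep ([], some h0) tl) with hmerged
    rw [hstep0]
    rw [PySem.List.foldl_append_eq_flatMap (fun iv => PySem.List.pyRange iv.1 (iv.2 + 1)) merged []]
    rw [List.nil_append]
    -- B's output is strictly increasing and covers exactly A's ports
    have hpw : (merged.flatMap (fun iv => PySem.List.pyRange iv.1 (iv.2 + 1))).Pairwise (· < ·) :=
      expand_pairwise merged hm.2.1
    refine PySem.List.sorted_eq_of_perm_of_pairwise_lt _ _ _ ?_ hpw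
    refine (List.perm_ext_iff_of_nodup (hpw.imp (fun h => ne_of_lt h))
      (PySem.Set.nodup_ofList _)).mpr ?_
    intro x
    rw [PySem.Set.mem_ofList, mem_expand, hm.2.2 x, ← hcover x, hcase]
    simp

-- ===== VERDICT (by name: the statement is the Claim_ definition above) =====
theorem parse_port_input_spec : Claim_equal_parse_port_input := by
  intro port_str _hdom hpre
  show parse_port_input port_str = parse_port_input_alt port_str
  exact main_eq port_str hpre
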